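-- pv_equiv track=rewrite | github.com/AmadoMiguel/Coding-problems | Python/December-2019/calculateProductsExceptLess.py | getRunningProducts
-- ===== SOURCE A (Python) =====
-- def getRunningProducts(nums):
--     normRunningProd, invRunningProd = nums[:], nums[:]
--     ptr1, ptr2, = 0, len(nums) - 1
--     cumProdNorm, cumProdInv = 1, 1
--     while ptr1 < len(nums) and ptr2 >= 0:
--         cumProdNorm *= nums[ptr1]
--         cumProdInv *= nums[ptr2]
--         normRunningProd[ptr1] = cumProdNorm
--         invRunningProd[ptr2] = cumProdInv
--         ptr1, ptr2 = ptr1 + 1, ptr2 - 1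
--     return normRunningProd, invRunningProd
-- ===== SOURCE B (Python) =====
-- def getRunningProducts(nums):
--     # Divide and conquer: solve each half recursively, then stitch:
--     # right half's prefixes are scaled by the left half's total product,
--     # left half's suffixes by the right half's total product.
--     if len(nums) <= 1:
--         return list(nums), list(nums)
--     mid = len(nums) // 2
--     p1, s1 = getRunningProducts(nums[:mid])
--     p2, s2 = getRunningProducts(nums[mid:])
--     left_prod = p1[-1]
--     right_prod = s2[0]
--     return p1 + [left_prod * v for v in p2], [v * right_prod for v in s1] + s2
-- ===== Notes on version B (the rewrite author's own statement) =====
-- stated objective: alternative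
-- what changed: Replaces A's single interleaved two-pointer linear scan by a divide-and-conquer recursion: each half's running products are computed recursively and the halves are stitched by scaling the right half's prefixes with the left half's total product and the left half's suffixes with the right half's total product.
import Mathlib
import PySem

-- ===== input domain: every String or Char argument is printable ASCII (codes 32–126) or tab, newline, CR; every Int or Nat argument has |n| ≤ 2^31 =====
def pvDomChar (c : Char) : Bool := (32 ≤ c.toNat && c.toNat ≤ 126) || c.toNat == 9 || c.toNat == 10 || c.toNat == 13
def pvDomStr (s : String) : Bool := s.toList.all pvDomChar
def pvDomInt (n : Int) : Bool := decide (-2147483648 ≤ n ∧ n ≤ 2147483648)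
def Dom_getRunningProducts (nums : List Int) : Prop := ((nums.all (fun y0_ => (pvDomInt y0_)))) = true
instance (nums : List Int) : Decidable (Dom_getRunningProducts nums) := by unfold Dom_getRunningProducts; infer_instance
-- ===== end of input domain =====

-- B replaces A's single interleaved two-pointer linear scan by a divide-and-conquer
-- recursion on the two halves of the list (alternative decomposition; return value only).

-- ===== PORT A =====
-- the while-loop of A: state (normRunningProd, invRunningProd, ptr1, ptr2, cumProdNorm, cumProdInv)
-- fuel = nums.length - ptr1 bounds the remaining iterations; the loop still
-- exits by its own condition, fuel only makes the recursion structural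
def aLoop (nums : List Int) : Nat → List Int → List Int → Int → Int → Int → Int →
    List Int × List Int
  | 0, norm, inv, _, _, _, _ => (norm, inv)
  | fuel + 1, norm, inv, ptr1, ptr2, cpN, cpI =>
    if ptr1 < (nums.length : Int) ∧ 0 ≤ ptr2 then
      let cpN' := cpN * PySem.List.pyGetD nums ptr1 0
      let cpI' := cpI * PySem.List.pyGetD nums ptr2 0
      aLoop nums fuel (PySem.List.pySetD norm ptr1 cpN') (PySem.List.pySetD inv ptr2 cpI')
        (ptr1 + 1) (ptr2 - 1) cpN' cpI'
    else (norm, inv)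

def getRunningProducts (nums : List Int) : List Int × List Int :=
  aLoop nums nums.length nums nums 0 ((nums.length : Int) - 1) 1 1

-- ===== PORT B =====
-- divide and conquer on the two halves; p1[-1] / s2[0] are total here (the halves
-- are nonempty when this branch runs), ported with pyGetD which agrees with
-- Python's indexing on in-range indices
def getRunningProducts_alt (nums : List Int) : List Int × List Int :=
  if nums.length ≤ 1 then (nums, nums)
  else
    let mid := nums.length / 2
    let ps1 := getRunningProducts_alt (nums.take mid)
    let ps2 := getRunningProducts_alt (nums.drop mid)
    let leftProd := PySem.List.pyGetD ps1.1 (-1) 0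
    let rightProd := PySem.List.pyGetD ps2.2 0 0
    (ps1.1 ++ ps2.1.map (fun v => leftProd * v),
     ps1.2.map (fun v => v * rightProd) ++ ps2.2)
termination_by nums.length
decreasing_by
  · simp; omega
  · simp; omega

-- ===== PRECONDITION & SPEC =====
def Spec_getRunningProducts (nums : List Int) (out : List Int × List Int) : Prop := out = getRunningProducts_alt nums
instance (nums : List Int) (out : List Int × List Int) : Decidable (Spec_getRunningProducts nums out) := by unfold Spec_getRunningProducts; infer_instance

-- ===== CLAIM =====
def Claim_equal_getRunningProducts : Prop := ∀ (nums : List Int), Dom_getRunningProducts nums → Spec_getRunningProducts nums (getRunningProducts nums)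

-- ===== LEMMAS AND PROOFS =====

-- canonical forms: accMul p xs = running products seeded with p; suf xs j = product of xs[j:]
def accMul : Int → List Int → List Int
  | _, [] => []
  | p, x :: xs => (p * x) :: accMul (p * x) xs

def suf : List Int → List Int
  | [] => []
  | x :: xs => (x * xs.prod) :: suf xs

theorem suf_length (xs : List Int) : (suf xs).length = xs.length := by
  induction xs with
  | nil => rfl
  | cons x xs ih => simp [suf, ih]

theorem suf_getElem (xs : List Int) (j : Nat) (hj : j < xs.length) :
    (suf xs)[j]'(by rw [suf_length]; exact hj) = (xs.drop j).prod := by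
  induction xs generalizing j with
  | nil => simp at hj
  | cons x xs ih =>
    cases j with
    | zero => simp [suf]
    | succ j => simpa [suf] using ih j (by simpa using hj)

theorem accMul_append (p : Int) (as bs : List Int) :
    accMul p (as ++ bs) = accMul p as ++ accMul (p * as.prod) bs := by
  induction as generalizing p with
  | nil => simp [accMul]
  | cons a as ih => simp [accMul, ih, mul_assoc]

theorem accMul_mul (c p : Int) (xs : List Int) :
    accMul (c * p) xs = (accMul p xs).map (fun v => c * v) := by
  induction xs generalizing p with
  | nil => simp [accMul]
  | cons x xs ih => simp [accMul, mul_assoc, ih]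

theorem accMul_scale (c : Int) (xs : List Int) :
    (accMul 1 xs).map (fun v => c * v) = accMul c xs := by
  have h := accMul_mul c 1 xs
  simpa using h.symm

theorem suf_append (l r : List Int) :
    suf (l ++ r) = (suf l).map (fun v => v * r.prod) ++ suf r := by
  induction l with
  | nil => simp [suf]
  | cons x xs ih => simp [suf, ih, mul_assoc]

theorem accMul_ne_nil (p : Int) (l : List Int) (h : l ≠ []) : accMul p l ≠ [] := by
  cases l <;> simp_all [accMul]

theorem getLast?_accMul : ∀ (l : List Int), l ≠ [] → ∀ (p : Int),
    (accMul p l).getLast? = some (p * l.prod) := by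
  intro l
  induction l with
  | nil => intro h; exact absurd rfl h
  | cons x xs ih =>
    intro _ p
    cases xs with
    | nil => simp [accMul]
    | cons y ys =>
      have h2 := ih (by simp) (p * x)
      simp only [accMul] at h2 ⊢
      rw [List.getLast?_cons_cons, h2]
      simp [mul_assoc]

theorem pyGetD_accMul_neg_one (l : List Int) (h : l ≠ []) :
    PySem.List.pyGetD (accMul 1 l) (-1) 0 = l.prod := by
  have hne := accMul_ne_nil 1 l h
  rw [PySem.List.pyGetD_neg_one (accMul 1 l) 0 hne]
  have h1 := getLast?_accMul l h 1
  have h2 : some ((accMul 1 l).getLast hne) = some (1 * l.prod) := by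
    rw [← List.getLast?_eq_some_getLast]; exact h1
  simpa using h2

theorem pyGetD_suf_zero (r : List Int) (h : r ≠ []) :
    PySem.List.pyGetD (suf r) 0 0 = r.prod := by
  cases r with
  | nil => exact absurd rfl h
  | cons x xs => simp [suf, PySem.List.pyGetD_zero_cons]

theorem alt_eq_aux : ∀ (n : Nat) (xs : List Int), xs.length ≤ n →
    getRunningProducts_alt xs = (accMul 1 xs, suf xs) := by
  intro n
  induction n with
  | zero =>
    intro xs hx
    have : xs = [] := List.eq_nil_of_length_eq_zero (by omega)
    subst this
    rw [getRunningProducts_alt]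
    simp [accMul, suf]
  | succ n ih =>
    intro xs hx
    rw [getRunningProducts_alt]
    by_cases hle : xs.length ≤ 1
    · rw [if_pos hle]
      match xs, hle with
      | [], _ => rfl
      | [x], _ => simp [accMul, suf]
    · rw [if_neg hle]
      rw [not_le] at hle
      have hmid1 : 1 ≤ xs.length / 2 := by omega
      have hmid2 : xs.length / 2 < xs.length := by omega
      have htake : getRunningProducts_alt (xs.take (xs.length / 2))
          = (accMul 1 (xs.take (xs.length / 2)), suf (xs.take (xs.length / 2))) :=
        ih _ (by have := List.length_take_le (xs.length / 2) xs; omega)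
      have hdrop : getRunningProducts_alt (xs.drop (xs.length / 2))
          = (accMul 1 (xs.drop (xs.length / 2)), suf (xs.drop (xs.length / 2))) :=
        ih _ (by rw [List.length_drop]; omega)
      simp only [htake, hdrop]
      have htne : xs.take (xs.length / 2) ≠ [] :=
        List.ne_nil_of_length_pos (by rw [List.length_take]; omega)
      have hdne : xs.drop (xs.length / 2) ≠ [] :=
        List.ne_nil_of_length_pos (by rw [List.length_drop]; omega)
      simp only [pyGetD_accMul_neg_one _ htne, pyGetD_suf_zero _ hdne]
      have hsplit : xs.take (xs.length / 2) ++ xs.drop (xs.length / 2) = xs :=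
        List.take_append_drop _ xs
      rw [Prod.mk.injEq]
      refine ⟨?_, ?_⟩
      · rw [accMul_scale]
        conv_rhs => rw [← hsplit]
        rw [accMul_append, one_mul]
      · conv_rhs => rw [← hsplit]
        rw [suf_append]

theorem alt_eq (xs : List Int) : getRunningProducts_alt xs = (accMul 1 xs, suf xs) :=
  alt_eq_aux xs.length xs le_rfl

theorem set_take_succ (l : List Int) (i : Nat) (h : i < l.length) (v : Int) :
    (l.set i v).take (i + 1) = l.take i ++ [v] := by
  induction l generalizing i with
  | nil => simp at h
  | cons a l ih =>
    cases i with
    | zero => simp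
    | succ i => simp [ih i (by simpa using h)]

theorem set_drop (l : List Int) (i : Nat) (h : i < l.length) (v : Int) :
    (l.set i v).drop i = v :: l.drop (i + 1) := by
  induction l generalizing i with
  | nil => simp at h
  | cons a l ih =>
    cases i with
    | zero => simp
    | succ i => simp [ih i (by simpa using h)]

theorem loop_char (nums : List Int) :
    ∀ (k i : Nat) (norm inv : List Int), i + k = nums.length →
      norm.length = nums.length → inv.length = nums.length →
      aLoop nums k norm inv (i : Int) ((nums.length : Int) - 1 - i)
        ((nums.take i).prod) ((nums.drop (nums.length - i)).prod)
      = (norm.take i ++ accMul ((nums.take i).prod) (nums.drop i),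
         (suf nums).take (nums.length - i) ++ inv.drop (nums.length - i)) := by
  intro k
  induction k with
  | zero =>
    intro i norm inv hik hn hi
    have hie : i = nums.length := by omega
    simp only [aLoop]
    subst hie
    have ht : List.take nums.length norm = norm := List.take_of_length_le hn.le
    simp [accMul, ht]
  | succ k ih =>
    intro i norm inv hik hn hi
    have hilt : i < nums.length := by omega
    simp only [aLoop]
    rw [if_pos (by constructor <;> [exact_mod_cast hilt; omega] :
      (i : Int) < (nums.length : Int) ∧ (0:Int) ≤ (nums.length : Int) - 1 - i)]
    have hfix : (nums.length : Int) - 1 - (i : Int) = ((nums.length - 1 - i : Nat) : Int) := by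
      omega
    have hget1 : PySem.List.pyGetD nums (i : Int) 0 = nums[i] := by
      rw [PySem.List.pyGetD_natCast]; exact List.getD_eq_getElem nums 0 hilt
    have hj : nums.length - 1 - i < nums.length := by omega
    have hget2 : PySem.List.pyGetD nums ((nums.length : Int) - 1 - (i : Int)) 0
        = nums[nums.length - 1 - i] := by
      rw [hfix, PySem.List.pyGetD_natCast]; exact List.getD_eq_getElem nums 0 hj
    have hget2' : PySem.List.pyGetD nums ((nums.length - 1 - i : Nat) : Int) 0
        = nums[nums.length - 1 - i] := by rw [← hfix]; exact hget2
    simp only [hget1, hfix, hget2', PySem.List.pySetD_natCast]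
    have hcast : (i : Int) + 1 = ((i + 1 : Nat) : Int) := by push_cast; ring
    have hcast2 : ((nums.length - 1 - i : Nat) : Int) - 1
        = (nums.length : Int) - 1 - ((i + 1 : Nat) : Int) := by omega
    have hcpN : (nums.take i).prod * nums[i] = (nums.take (i + 1)).prod := by
      rw [List.prod_take_succ nums i hilt]
    have hdropstep : nums.drop (nums.length - (i + 1))
        = nums[nums.length - 1 - i] :: nums.drop (nums.length - i) := by
      have h1 : nums.length - (i + 1) = nums.length - 1 - i := by omega
      have h2 : nums.length - i = (nums.length - 1 - i) + 1 := by omega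
      rw [h1, h2, List.drop_eq_getElem_cons hj]
    have hcpI : (nums.drop (nums.length - i)).prod * nums[nums.length - 1 - i]
        = (nums.drop (nums.length - (i + 1))).prod := by
      rw [hdropstep]; simp [mul_comm]
    rw [hcast, hcast2, hcpN, hcpI]
    rw [ih (i + 1) _ _ (by omega) (by simpa using hn) (by simpa using hi)]
    rw [Prod.mk.injEq]
    refine ⟨?_, ?_⟩
    · rw [← hcpN]
      rw [set_take_succ norm i (by omega) _]
      rw [List.drop_eq_getElem_cons hilt]
      simp [accMul, hcpN]
    · rw [← hcpI]
      have h1 : nums.length - (i + 1) = nums.length - 1 - i := by omega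
      have h2 : nums.length - i = (nums.length - 1 - i) + 1 := by omega
      rw [h1, h2]
      rw [set_drop inv (nums.length - 1 - i) (by omega) _]
      rw [List.take_add_one]
      have hsome : (suf nums)[nums.length - 1 - i]? =
          some ((nums.drop (nums.length - 1 - i)).prod) := by
        rw [List.getElem?_eq_getElem (by rw [suf_length]; exact hj)]
        rw [suf_getElem nums _ hj]
      rw [hsome]
      have : (nums.drop (nums.length - 1 - i)).prod
          = (nums.drop (nums.length - i)).prod * nums[nums.length - 1 - i] := by
        rw [hcpI, h1]
      rw [this]
      simp
      exact Or.inl (by rw [← h2])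

theorem a_eq (nums : List Int) :
    getRunningProducts nums = (accMul 1 nums, suf nums) := by
  have h := loop_char nums nums.length 0 nums nums (by omega) rfl rfl
  simp only [Nat.sub_zero, List.take_zero, List.drop_length, List.prod_nil,
    List.drop_zero, List.nil_append] at h
  have hlen : (suf nums).take nums.length = suf nums := by
    rw [← suf_length]; exact List.take_length
  rw [hlen] at h
  simpa [getRunningProducts, Nat.cast_zero] using h

-- ===== VERDICT =====
theorem getRunningProducts_spec : Claim_equal_getRunningProducts := by
  intro nums _
  unfold Spec_getRunningProducts
  rw [a_eq, alt_eq]
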